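-- pv_equiv track=rewrite | github.com/senna-lang/algorithm | note/linear-search/main.py | linearSearchFindMinTotal
-- ===== SOURCE A (Python) =====
-- from typing import List
--
-- def linearSearchFindMinTotal(numArr1: List[int], numArr2: List[int]) -> int:
--     minTotal = numArr1[0] + numArr2[0]
--     for i in range(len(numArr1)):
--         for j in range(len(numArr2)):
--             total = numArr1[i] + numArr2[j]
--             if total < minTotal:
--                 minTotal = total
--
--     return minTotal
-- ===== SOURCE B (Python) =====
-- from typing import List
--
-- def linearSearchFindMinTotal(numArr1: List[int], numArr2: List[int]) -> int:
--     m1 = numArr1[0]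
--     for v in numArr1:
--         if v < m1:
--             m1 = v
--     m2 = numArr2[0]
--     for v in numArr2:
--         if v < m2:
--             m2 = v
--     return m1 + m2
-- ===== Notes on version B (the rewrite author's own statement) =====
-- stated objective: faster
-- what changed: Replaces A's nested double loop over all pair sums with two independent single-pass minimum scans (one per array) whose results are added.
import Mathlib
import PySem

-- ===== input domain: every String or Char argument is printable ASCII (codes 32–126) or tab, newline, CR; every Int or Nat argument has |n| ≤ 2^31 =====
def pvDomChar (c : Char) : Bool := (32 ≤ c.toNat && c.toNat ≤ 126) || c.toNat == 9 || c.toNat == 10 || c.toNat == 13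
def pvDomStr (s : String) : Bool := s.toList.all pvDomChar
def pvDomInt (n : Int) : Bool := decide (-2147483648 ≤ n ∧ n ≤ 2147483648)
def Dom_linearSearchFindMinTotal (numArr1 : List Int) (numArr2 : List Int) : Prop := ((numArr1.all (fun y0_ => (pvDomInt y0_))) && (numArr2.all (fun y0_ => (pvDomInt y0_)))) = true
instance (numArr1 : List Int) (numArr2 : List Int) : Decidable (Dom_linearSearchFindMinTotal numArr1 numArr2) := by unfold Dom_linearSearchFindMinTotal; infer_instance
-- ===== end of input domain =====

-- B replaces A's nested O(n*m) loop over all pair sums by two independent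
-- single-pass minimum scans whose results are added (faster).

-- ===== PORT A =====
-- literal transliteration of A: minTotal = a[0] + b[0]; nested index loops over all pairs
def linearSearchFindMinTotal (numArr1 : List Int) (numArr2 : List Int) : Int :=
  let minTotal := PySem.List.pyGetD numArr1 0 0 + PySem.List.pyGetD numArr2 0 0
  (PySem.List.pyRange 0 numArr1.length 1).foldl (fun minTotal i =>
    (PySem.List.pyRange 0 numArr2.length 1).foldl (fun minTotal j =>
      let total := PySem.List.pyGetD numArr1 i 0 + PySem.List.pyGetD numArr2 j 0
      if total < minTotal then total else minTotal) minTotal) minTotal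

-- ===== PORT B =====
-- B-side helper: m = xs[0]; for v in xs: if v < m: m = v
def pvScanMin (xs : List Int) : Int :=
  xs.foldl (fun m v => if v < m then v else m) (PySem.List.pyGetD xs 0 0)

def linearSearchFindMinTotal_alt (numArr1 : List Int) (numArr2 : List Int) : Int :=
  pvScanMin numArr1 + pvScanMin numArr2

-- ===== PRECONDITION & SPEC =====
-- Pre_ excludes exactly the inputs where the Python A raises IndexError: an empty array.
def Pre_linearSearchFindMinTotal (numArr1 : List Int) (numArr2 : List Int) : Prop :=
  numArr1 ≠ [] ∧ numArr2 ≠ []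
instance (numArr1 : List Int) (numArr2 : List Int) : Decidable (Pre_linearSearchFindMinTotal numArr1 numArr2) := by unfold Pre_linearSearchFindMinTotal; infer_instance

def pvWitness_linearSearchFindMinTotal : List Int × List Int := ([3, -1, 2], [5, 4])

def Spec_linearSearchFindMinTotal (numArr1 : List Int) (numArr2 : List Int) (out : Int) : Prop := out = linearSearchFindMinTotal_alt numArr1 numArr2
instance (numArr1 : List Int) (numArr2 : List Int) (out : Int) : Decidable (Spec_linearSearchFindMinTotal numArr1 numArr2 out) := by unfold Spec_linearSearchFindMinTotal; infer_instance

-- ===== CLAIM (what is proved, stated in full; the proofs are below) =====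
def Claim_equal_linearSearchFindMinTotal : Prop := ∀ (numArr1 : List Int) (numArr2 : List Int), Dom_linearSearchFindMinTotal numArr1 numArr2 → Pre_linearSearchFindMinTotal numArr1 numArr2 → Spec_linearSearchFindMinTotal numArr1 numArr2 (linearSearchFindMinTotal numArr1 numArr2)

-- ===== LEMMAS AND PROOFS =====

-- 'if v < m then v else m' is 'min m v'
theorem pv_if_eq_min (m v : Int) : (if v < m then v else m) = min m v := by
  rcases lt_or_ge v m with h | h
  · simp [h, min_eq_right h.le]
  · simp [not_lt.mpr h, min_eq_left h]

theorem pv_min_add (c w v : Int) : min (c + w) (c + v) = c + min w v := by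
  rcases le_total w v with h | h
  · rw [min_eq_left h, min_eq_left (by omega)]
  · rw [min_eq_right h, min_eq_right (by omega)]

-- a fold of 'min acc (c + v)' starting at 'min m (c + w)' pulls out to 'min m (c + min-fold)'
theorem pv_fold_shift (c : Int) (bs : List Int) : ∀ (m w : Int),
    bs.foldl (fun acc v => min acc (c + v)) (min m (c + w)) = min m (c + bs.foldl min w) := by
  induction bs with
  | nil => intro m w; rfl
  | cons v bs ih =>
      intro m w
      simp only [List.foldl_cons]
      rw [min_assoc, pv_min_add, ih]

theorem pv_scanMin_cons (x : Int) (xs : List Int) :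
    pvScanMin (x :: xs) = xs.foldl min x := by
  have hf : (fun (m v : Int) => if v < m then v else m) = min := by
    funext m v; exact pv_if_eq_min m v
  simp only [pvScanMin, PySem.List.pyGetD_zero_cons, hf, List.foldl_cons, min_self]

theorem pv_portA_eq (a b : List Int) :
    linearSearchFindMinTotal a b
    = (PySem.List.pyRange 0 (a.length : Int) 1).foldl (fun m i =>
        (PySem.List.pyRange 0 (b.length : Int) 1).foldl (fun m j =>
          if PySem.List.pyGetD a i 0 + PySem.List.pyGetD b j 0 < m
          then PySem.List.pyGetD a i 0 + PySem.List.pyGetD b j 0 else m) m)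
        (PySem.List.pyGetD a 0 0 + PySem.List.pyGetD b 0 0) := rfl

theorem pv_foldl_min_le (xs : List Int) (a : Int) : xs.foldl min a ≤ a := by
  induction xs generalizing a with
  | nil => simp
  | cons v xs ih => simpa using le_trans (ih (min a v)) (min_le_left a v)

-- ===== VERDICT (by name: the statement is the Claim_ definition above) =====
theorem linearSearchFindMinTotal_spec : Claim_equal_linearSearchFindMinTotal := by
  intro numArr1 numArr2 _ hpre
  obtain ⟨h1, h2⟩ := hpre
  obtain ⟨x, as, rfl⟩ := List.exists_cons_of_ne_nil h1
  obtain ⟨y, bs, rfl⟩ := List.exists_cons_of_ne_nil h2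
  unfold Spec_linearSearchFindMinTotal linearSearchFindMinTotal_alt
  rw [pv_scanMin_cons, pv_scanMin_cons, pv_portA_eq]
  set M1 := as.foldl min x with hM1
  set M2 := bs.foldl min y with hM2
  -- rewrite the index loops as element folds
  rw [PySem.List.foldl_pyRange_zero_pyGetD' (x :: as) 0
        (fun minTotal xi =>
          (PySem.List.pyRange 0 ((y :: bs).length : Int) 1).foldl (fun m j =>
            if xi + PySem.List.pyGetD (y :: bs) j 0 < m then xi + PySem.List.pyGetD (y :: bs) j 0 else m) minTotal)]
  have hinner : ∀ (c m : Int),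
      (PySem.List.pyRange 0 ((y :: bs).length : Int) 1).foldl (fun m j =>
        if c + PySem.List.pyGetD (y :: bs) j 0 < m then c + PySem.List.pyGetD (y :: bs) j 0 else m) m
      = min m (c + M2) := by
    intro c m
    rw [PySem.List.foldl_pyRange_zero_pyGetD' (y :: bs) 0 (fun m v => if c + v < m then c + v else m)]
    have hf : (fun (m v : Int) => if c + v < m then c + v else m) = fun m v => min m (c + v) := by
      funext m v; exact pv_if_eq_min m (c + v)
    rw [hf]
    simp only [List.foldl_cons]
    rw [pv_fold_shift c bs, hM2]
  -- the outer fold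
  simp only [PySem.List.pyGetD_zero_cons, List.foldl_cons]
  have houter : ∀ (m w : Int),
      as.foldl (fun m xi =>
        (PySem.List.pyRange 0 ((y :: bs).length : Int) 1).foldl (fun m j =>
          if xi + PySem.List.pyGetD (y :: bs) j 0 < m then xi + PySem.List.pyGetD (y :: bs) j 0 else m) m)
        (min m (M2 + w))
      = min m (M2 + as.foldl min w) := by
    intro m w
    have : (fun (m xi : Int) =>
        (PySem.List.pyRange 0 ((y :: bs).length : Int) 1).foldl (fun m j =>
          if xi + PySem.List.pyGetD (y :: bs) j 0 < m then xi + PySem.List.pyGetD (y :: bs) j 0 else m) m)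
        = fun m xi => min m (M2 + xi) := by
      funext m xi
      rw [hinner xi m]; ring_nf
    rw [this]
    exact pv_fold_shift M2 as m w
  rw [hinner x (x + y)]
  have hxy : min (x + y) (x + M2) = min (x + y) (M2 + x) := by ring_nf
  rw [hxy, houter (x + y) x]
  have hle1 : M1 ≤ x := pv_foldl_min_le as x
  have hle2 : M2 ≤ y := pv_foldl_min_le bs y
  rw [← hM1]
  have : M2 + M1 ≤ x + y := by omega
  rw [min_eq_right this]; ring
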